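-- pv_equiv track=rewrite | github.com/nickte4/aoc | 2023/python/day4.py | get_points_from_card
-- ===== SOURCE A (Python) =====
-- def get_points_from_card(win_set, have_nums):
--     num_of_wins = 0
--     for num in have_nums:
--         if num in win_set:
--             num_of_wins += 1
--     if num_of_wins == 0:
--         return 0
--     else:
--         return pow(2, num_of_wins - 1)
-- ===== SOURCE B (Python) =====
-- def get_points_from_card(win_set, have_nums):
--     points = 0
--     for num in have_nums:
--         if num in win_set:
--             points = 1 if points == 0 else points * 2
--     return points
-- ===== Notes on version B (the rewrite author's own statement) =====
-- stated objective: simpler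
-- what changed: B folds the score directly by iterative doubling (1 on the first match, then *2 per match) instead of counting matches and applying the closed form pow(2, count-1) with an explicit zero guard.
import Mathlib
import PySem

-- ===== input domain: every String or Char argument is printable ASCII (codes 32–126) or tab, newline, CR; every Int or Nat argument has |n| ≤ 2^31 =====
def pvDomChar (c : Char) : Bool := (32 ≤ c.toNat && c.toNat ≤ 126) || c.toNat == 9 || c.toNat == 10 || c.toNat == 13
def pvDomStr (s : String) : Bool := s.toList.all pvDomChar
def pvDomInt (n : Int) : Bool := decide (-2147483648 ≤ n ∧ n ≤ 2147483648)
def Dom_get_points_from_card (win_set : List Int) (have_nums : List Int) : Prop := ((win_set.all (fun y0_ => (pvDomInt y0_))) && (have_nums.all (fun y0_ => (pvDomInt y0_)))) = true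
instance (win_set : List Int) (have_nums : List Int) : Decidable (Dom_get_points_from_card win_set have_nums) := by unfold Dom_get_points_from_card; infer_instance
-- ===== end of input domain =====

-- B folds the score by iterative doubling instead of counting matches and applying pow(2, count-1); same result, simpler decomposition.


-- ===== PORT A =====
def get_points_from_card (win_set : List Int) (have_nums : List Int) : Int :=
  let num_of_wins : Int :=
    have_nums.foldl (fun num_of_wins num =>
      if win_set.contains num then num_of_wins + 1 else num_of_wins) 0
  if num_of_wins = 0 then 0 else (2 : Int) ^ (num_of_wins - 1).toNat

-- ===== PORT B =====
def get_points_from_card_alt (win_set : List Int) (have_nums : List Int) : Int :=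
  have_nums.foldl (fun points num =>
    if win_set.contains num then (if points = 0 then 1 else points * 2) else points) 0

-- ===== PRECONDITION & SPEC =====
def Spec_get_points_from_card (win_set : List Int) (have_nums : List Int) (out : Int) : Prop := out = get_points_from_card_alt win_set have_nums
instance (win_set : List Int) (have_nums : List Int) (out : Int) : Decidable (Spec_get_points_from_card win_set have_nums out) := by unfold Spec_get_points_from_card; infer_instance

-- ===== CLAIM (what is proved, stated in full; the proofs are below) =====
def Claim_equal_get_points_from_card : Prop := ∀ (win_set : List Int) (have_nums : List Int), Dom_get_points_from_card win_set have_nums → Spec_get_points_from_card win_set have_nums (get_points_from_card win_set have_nums)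

-- ===== LEMMAS AND PROOFS =====

-- score of a nonnegative counter, as A computes it from the count
def pvScore (c : Int) : Int := if c = 0 then 0 else (2 : Int) ^ (c - 1).toNat

theorem pvScore_step (c : Int) (hc : 0 ≤ c) :
    (if pvScore c = 0 then 1 else pvScore c * 2) = pvScore (c + 1) := by
  unfold pvScore
  rcases eq_or_lt_of_le hc with h | h
  · simp [← h]
  · have hne : c ≠ 0 := by omega
    have hpos : (0 : Int) < (2 : Int) ^ (c - 1).toNat := by positivity
    have hc1 : (c + 1 - 1).toNat = (c - 1).toNat + 1 := by omega
    rw [if_neg hne, if_neg hpos.ne', if_neg (show c + 1 ≠ 0 by omega), hc1, pow_succ]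

theorem fold_agree (win_set l : List Int) (c : Int) (hc : 0 ≤ c) :
    l.foldl (fun points num =>
      if win_set.contains num then (if points = 0 then 1 else points * 2) else points) (pvScore c)
    = pvScore (l.foldl (fun n num => if win_set.contains num then n + 1 else n) c) := by
  induction l generalizing c with
  | nil => rfl
  | cons x xs ih =>
    simp only [List.foldl_cons]
    by_cases hx : win_set.contains x
    · simp only [if_pos hx]
      rw [pvScore_step c hc, ih (c + 1) (by omega)]
    · simp only [if_neg hx]
      exact ih c hc

-- ===== VERDICT (by name: the statement is the Claim_ definition above) =====
theorem get_points_from_card_spec : Claim_equal_get_points_from_card := by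
  intro win_set have_nums _
  unfold Spec_get_points_from_card get_points_from_card get_points_from_card_alt
  have h := fold_agree win_set have_nums 0 le_rfl
  have h0 : pvScore 0 = 0 := rfl
  rw [h0] at h
  rw [h, pvScore]
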